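-- pv_equiv track=rewrite | github.com/Morteza1814/PARMIK | plot/bestAlignHisto_blast.py | cluster_data
-- ===== SOURCE A (Python) =====
-- def cluster_data(data, bucket_size=10):
--     clustered_data = {}
--     for key, value in data.items():
--         bucket = (key // bucket_size) * bucket_size
--         if bucket in clustered_data:
--             clustered_data[bucket] += value
--         else:
--             clustered_data[bucket] = value
--     return clustered_data
-- ===== SOURCE B (Python) =====
-- def cluster_data(data, bucket_size=10):
--     buckets = [(k // bucket_size) * bucket_size for k in data]
--     order = list(dict.fromkeys(buckets))
--     vals = list(data.values())
--     return {b: sum(v for bk, v in zip(buckets, vals) if bk == b)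
--             for b in order}
-- ===== Notes on version B (the rewrite author's own statement) =====
-- stated objective: alternative
-- what changed: Replaced the streaming dict-accumulate loop by a three-phase pipeline: compute all bucket keys, deduplicate them in first-occurrence order, then build each dict entry as the sum of the values whose bucket matches.
import Mathlib
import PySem

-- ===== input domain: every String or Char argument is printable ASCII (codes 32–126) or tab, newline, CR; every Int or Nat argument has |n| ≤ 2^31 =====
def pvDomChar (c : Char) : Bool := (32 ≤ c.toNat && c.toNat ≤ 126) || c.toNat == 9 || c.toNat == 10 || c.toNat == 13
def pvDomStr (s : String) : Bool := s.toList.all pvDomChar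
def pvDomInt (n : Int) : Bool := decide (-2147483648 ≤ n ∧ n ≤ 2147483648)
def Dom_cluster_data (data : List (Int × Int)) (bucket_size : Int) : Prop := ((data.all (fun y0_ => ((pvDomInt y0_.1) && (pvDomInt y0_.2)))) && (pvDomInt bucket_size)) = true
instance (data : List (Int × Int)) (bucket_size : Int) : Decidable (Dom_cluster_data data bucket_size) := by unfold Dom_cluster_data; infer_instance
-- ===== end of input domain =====

-- B changes the decomposition (bucket-key list → ordered dedup → per-bucket sums) instead of A's streaming accumulate; same cost class, not claimed faster.

-- ===== PORT A =====
def cluster_data (data : List (Int × Int)) (bucket_size : Int) : List (Int × Int) :=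
  (data.foldl
    (fun (d : PySem.Dict Int Int) kv =>
      let bucket := PySem.Int.floordiv kv.1 bucket_size * bucket_size
      if d.contains bucket then d.insert bucket (d.getD bucket 0 + kv.2)
      else d.insert bucket kv.2)
    PySem.Dict.empty).items

-- ===== PORT B =====
def cluster_data_alt (data : List (Int × Int)) (bucket_size : Int) : List (Int × Int) :=
  let buckets := data.map (fun kv => PySem.Int.floordiv kv.1 bucket_size * bucket_size)
  let order := PySem.List.dedup buckets
  let vals := data.map Prod.snd
  order.map (fun b => (b, (((buckets.zip vals).filter (fun p => p.1 == b)).map Prod.snd).sum))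

-- ===== PRECONDITION & SPEC =====
-- bucket_size = 0 makes Python's '//' raise ZeroDivisionError in A (and in B).
def Pre_cluster_data (data : List (Int × Int)) (bucket_size : Int) : Prop := bucket_size ≠ 0
instance (data : List (Int × Int)) (bucket_size : Int) : Decidable (Pre_cluster_data data bucket_size) := by unfold Pre_cluster_data; infer_instance
def pvWitness_cluster_data : (List (Int × Int)) × Int := ([(1, 2), (11, 3), (-5, 4), (5, 6)], 10)
def Spec_cluster_data (data : List (Int × Int)) (bucket_size : Int) (out : List (Int × Int)) : Prop := out = cluster_data_alt data bucket_size
instance (data : List (Int × Int)) (bucket_size : Int) (out : List (Int × Int)) : Decidable (Spec_cluster_data data bucket_size out) := by unfold Spec_cluster_data; infer_instance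

-- ===== CLAIM (what is proved, stated in full; the proofs are below) =====
def Claim_equal_cluster_data : Prop := ∀ (data : List (Int × Int)) (bucket_size : Int), Dom_cluster_data data bucket_size → Pre_cluster_data data bucket_size → Spec_cluster_data data bucket_size (cluster_data data bucket_size)

-- ===== LEMMAS AND PROOFS =====

-- A's step is exactly Dict.modify at the bucket key.
theorem step_eq_modify (d : PySem.Dict Int Int) (b v : Int) :
    (if d.contains b then d.insert b (d.getD b 0 + v) else d.insert b v)
      = d.modify b 0 (· + v) := by
  by_cases h : d.contains b = true
  · simp [PySem.Dict.modify, h]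
  · have hg : d.getD b 0 = 0 := PySem.Dict.getD_of_not_contains d 0 (by simpa using h)
    simp [PySem.Dict.modify, h, hg]

-- value at any key after a modify-accumulate loop
theorem getD_foldl_modify_add (l : List (Int × Int)) (key : Int × Int → Int)
    (d : PySem.Dict Int Int) (c : Int) :
    (l.foldl (fun d p => d.modify (key p) 0 (· + p.2)) d).getD c 0
      = d.getD c 0 + ((l.filter (fun p => key p == c)).map (·.2)).sum := by
  induction l generalizing d with
  | nil => simp
  | cons p t ih =>
      simp only [List.foldl_cons, ih, List.filter_cons]
      by_cases h : key p = c
      · simp [h, PySem.Dict.getD_modify_self]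
        ring
      · simp [h, PySem.Dict.getD_modify_of_ne d 0 _ (fun hc => h hc.symm)]

-- ===== VERDICT (by name: the statement is the Claim_ definition above) =====
theorem cluster_data_spec : Claim_equal_cluster_data := by
  intro data bucket_size _ _
  unfold Spec_cluster_data cluster_data cluster_data_alt
  set key : Int × Int → Int := fun kv => PySem.Int.floordiv kv.1 bucket_size * bucket_size with hkey
  have hstep : data.foldl
      (fun (d : PySem.Dict Int Int) kv =>
        let bucket := PySem.Int.floordiv kv.1 bucket_size * bucket_size
        if d.contains bucket then d.insert bucket (d.getD bucket 0 + kv.2)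
        else d.insert bucket kv.2)
      PySem.Dict.empty
      = data.foldl (fun d p => d.modify (key p) 0 (· + p.2)) PySem.Dict.empty := by
    refine PySem.List.foldl_congr_mem data _ _ _ (fun d p _ => ?_)
    simpa using step_eq_modify d (key p) p.2
  rw [hstep]
  set D := data.foldl (fun d p => d.modify (key p) 0 (· + p.2)) PySem.Dict.empty with hD
  have hnd : D.keys.Nodup := by
    exact PySem.Dict.nodup_keys_foldl_modify_key data key 0 (fun d p => (· + p.2)) _
      PySem.Dict.nodup_keys_empty
  have hkeys : D.keys = PySem.List.dedup (data.map key) := by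
    rw [hD, PySem.Dict.keys_foldl_modify_key]
    simp [PySem.Set.update_nil_left]
  rw [PySem.Dict.items_eq_map_keys D hnd 0, hkeys]
  dsimp only
  have hzip : (data.map key).zip (data.map Prod.snd) = data.map (fun kv => (key kv, kv.2)) := by
    rw [List.zip_map']
  rw [hzip]
  refine List.map_congr_left (fun b _ => ?_)
  have hval : D.getD b 0 = ((data.filter (fun p => key p == b)).map (·.2)).sum := by
    rw [hD, getD_foldl_modify_add]
    simp
  rw [hval]
  congr 1
  · -- equality of the two sums
    congr 1
    rw [List.filter_map]
    simp [Function.comp_def]
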